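-- pv_equiv track=rewrite | github.com/Mihajlovicka/nine-men-moris | Projakt ASP mice/board.py | razlika_broja_blokiranih_figura
-- ===== SOURCE A (Python) =====
-- susedni = [[1,9],[0,2,4],[1,14],[4,10],[1,3,5,7],[4,13],[7,11],[4,6,8],[7,12],[0,10,21],[3,9,11,18],[6,10,15],[8,13,17],[5,12,14,20],[2,13,23],
--            [11,16],[15,17,19],[12,16],[10,19],[16,18,20,22],[13,19],[9,22],[19,21,23],[14,22]]
--
-- WHITE = 'W'
--
-- BLACK = 'B'
--
-- def razlika_broja_blokiranih_figura(tabla):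
--     brW = brB = 0
--     for i in range(len(tabla)):
--         if tabla[i] == WHITE and da_li_je_zarobljen(tabla,i):
--             brW += 1
--         if tabla[i] == BLACK and da_li_je_zarobljen(tabla,i):
--             brB += 1
--     return brW - brB
--
-- def da_li_je_zarobljen(tabla,polje):
--     sus = susedni[polje]
--     for s in sus:
--         if tabla[s] == 'O':
--             return False
--     return True
-- ===== SOURCE B (Python) =====
-- susedni = [[1,9],[0,2,4],[1,14],[4,10],[1,3,5,7],[4,13],[7,11],[4,6,8],[7,12],[0,10,21],[3,9,11,18],[6,10,15],[8,13,17],[5,12,14,20],[2,13,23],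
--            [11,16],[15,17,19],[12,16],[10,19],[16,18,20,22],[13,19],[9,22],[19,21,23],[14,22]]
--
-- WHITE = 'W'
--
-- BLACK = 'B'
--
-- def razlika_broja_blokiranih_figura(tabla):
--     # Inverted traversal: one pass collects every position adjacent to an empty
--     # cell into a free-position set, a second pass scores pieces not in that set.
--     free = set()
--     for cell, sus in zip(tabla, susedni):
--         if cell == 'O':
--             free.update(sus)
--     diff = 0
--     for i in range(len(tabla)):
--         if i not in free:
--             if tabla[i] == WHITE:
--                 diff += 1
--             elif tabla[i] == BLACK:
--                 diff -= 1
--     return diff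
-- ===== Notes on version B (the rewrite author's own statement) =====
-- stated objective: alternative
-- what changed: Instead of scanning each piece's neighbour list with an inner early-return loop, B makes one pass collecting all neighbours of empty cells into a free-position set (valid because the adjacency table is symmetric) and a second pass scoring pieces absent from that set.
import Mathlib
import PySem

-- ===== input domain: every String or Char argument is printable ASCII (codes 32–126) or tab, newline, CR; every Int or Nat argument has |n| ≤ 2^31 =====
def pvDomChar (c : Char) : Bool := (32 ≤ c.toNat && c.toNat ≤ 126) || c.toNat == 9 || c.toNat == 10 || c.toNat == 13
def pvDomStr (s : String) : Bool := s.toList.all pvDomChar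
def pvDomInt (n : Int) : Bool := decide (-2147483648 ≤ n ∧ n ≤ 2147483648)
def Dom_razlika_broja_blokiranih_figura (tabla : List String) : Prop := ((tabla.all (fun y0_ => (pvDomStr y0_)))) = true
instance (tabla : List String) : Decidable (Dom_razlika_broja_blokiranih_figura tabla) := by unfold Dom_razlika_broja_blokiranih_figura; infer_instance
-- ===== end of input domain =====

-- B replaces A's per-piece neighbour scan by one pass collecting all neighbours of empty
-- cells into a set and a second pass scoring pieces absent from it (alternative decomposition).

-- ===== PORT A =====
def susedniL : List (List Nat) :=
  [[1,9],[0,2,4],[1,14],[4,10],[1,3,5,7],[4,13],[7,11],[4,6,8],[7,12],[0,10,21],[3,9,11,18],[6,10,15],[8,13,17],[5,12,14,20],[2,13,23],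
   [11,16],[15,17,19],[12,16],[10,19],[16,18,20,22],[13,19],[9,22],[19,21,23],[14,22]]

-- the inner early-return loop over sus: List.all is the same short-circuit scan;
-- getD stands in for Python indexing, exact under Pre_ (which excludes A's IndexErrors)
def da_li_je_zarobljen (tabla : List String) (polje : Nat) : Bool :=
  (susedniL.getD polje []).all (fun s => !(tabla.getD s "" == "O"))

def razlika_broja_blokiranih_figura (tabla : List String) : Int :=
  let r := (List.range tabla.length).foldl
    (fun (p : Int × Int) i =>
      let p1 := if tabla.getD i "" == "W" && da_li_je_zarobljen tabla i then p.1 + 1 else p.1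
      let p2 := if tabla.getD i "" == "B" && da_li_je_zarobljen tabla i then p.2 + 1 else p.2
      (p1, p2)) (0, 0)
  r.1 - r.2

-- ===== PORT B =====
def razlika_broja_blokiranih_figura_alt (tabla : List String) : Int :=
  let free : PySem.Set Nat :=
    (tabla.zip susedniL).foldl
      (fun acc p => if p.1 == "O" then PySem.Set.update acc p.2 else acc)
      PySem.Set.empty
  (List.range tabla.length).foldl
    (fun (d : Int) i =>
      if !(PySem.Set.contains free i) then
        if tabla.getD i "" == "W" then d + 1
        else if tabla.getD i "" == "B" then d - 1
        else d
      else d) 0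

-- ===== PRECONDITION & SPEC =====
-- Exactly the inputs on which A returns: every piece ('W'/'B') sits below index 24 and its
-- neighbour scan never reaches an out-of-range board index before an in-range 'O' neighbour
-- (otherwise A raises IndexError).
def Pre_razlika_broja_blokiranih_figura (tabla : List String) : Prop :=
  ∀ i ∈ List.range tabla.length, (tabla.getD i "" = "W" ∨ tabla.getD i "" = "B") →
    i < 24 ∧ ∀ k ∈ List.range (susedniL.getD i []).length,
      tabla.length ≤ (susedniL.getD i []).getD k 0 →
      ∃ m ∈ List.range k, (susedniL.getD i []).getD m 0 < tabla.length ∧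
        tabla.getD ((susedniL.getD i []).getD m 0) "" = "O"
instance (tabla : List String) : Decidable (Pre_razlika_broja_blokiranih_figura tabla) := by
  unfold Pre_razlika_broja_blokiranih_figura; infer_instance
def pvWitness_razlika_broja_blokiranih_figura : List String :=
  ["W","O","B","O","W","O","B","O","W","O","B","O","W","O","B","O","W","O","B","O","W","O","B","O"]
def Spec_razlika_broja_blokiranih_figura (tabla : List String) (out : Int) : Prop := out = razlika_broja_blokiranih_figura_alt tabla
instance (tabla : List String) (out : Int) : Decidable (Spec_razlika_broja_blokiranih_figura tabla out) := by unfold Spec_razlika_broja_blokiranih_figura; infer_instance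

-- ===== CLAIM (what is proved, stated in full; the proofs are below) =====
def Claim_equal_razlika_broja_blokiranih_figura : Prop := ∀ (tabla : List String), Dom_razlika_broja_blokiranih_figura tabla → Pre_razlika_broja_blokiranih_figura tabla → Spec_razlika_broja_blokiranih_figura tabla (razlika_broja_blokiranih_figura tabla)

-- ===== LEMMAS AND PROOFS =====

-- per-index contribution of A
def cA (tabla : List String) (i : Nat) : Int :=
  (if tabla.getD i "" == "W" && da_li_je_zarobljen tabla i then 1 else 0)
  - (if tabla.getD i "" == "B" && da_li_je_zarobljen tabla i then 1 else 0)

-- per-index contribution of B (free set abstracted)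
def cB (tabla : List String) (free : PySem.Set Nat) (i : Nat) : Int :=
  if !(PySem.Set.contains free i) then
    if tabla.getD i "" == "W" then 1
    else if tabla.getD i "" == "B" then -1
    else 0
  else 0

theorem foldA_eq_sum (tabla : List String) (l : List Nat) (a b : Int) :
    (l.foldl (fun (p : Int × Int) i =>
      let p1 := if tabla.getD i "" == "W" && da_li_je_zarobljen tabla i then p.1 + 1 else p.1
      let p2 := if tabla.getD i "" == "B" && da_li_je_zarobljen tabla i then p.2 + 1 else p.2
      (p1, p2)) (a, b)).1
    - (l.foldl (fun (p : Int × Int) i =>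
      let p1 := if tabla.getD i "" == "W" && da_li_je_zarobljen tabla i then p.1 + 1 else p.1
      let p2 := if tabla.getD i "" == "B" && da_li_je_zarobljen tabla i then p.2 + 1 else p.2
      (p1, p2)) (a, b)).2
    = a - b + (l.map (cA tabla)).sum := by
  induction l generalizing a b with
  | nil => simp
  | cons x l ih =>
    simp only [List.foldl_cons, List.map_cons, List.sum_cons]
    rw [ih]
    simp only [cA]
    split_ifs <;> ring

theorem foldB_eq_sum (tabla : List String) (free : PySem.Set Nat) (l : List Nat) (d : Int) :
    (l.foldl (fun (d : Int) i =>
      if !(PySem.Set.contains free i) then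
        if tabla.getD i "" == "W" then d + 1
        else if tabla.getD i "" == "B" then d - 1
        else d
      else d) d)
    = d + (l.map (cB tabla free)).sum := by
  induction l generalizing d with
  | nil => simp
  | cons x l ih =>
    simp only [List.foldl_cons, List.map_cons, List.sum_cons]
    rw [ih]
    simp only [cB]
    split_ifs <;> ring

theorem mem_freeFold (l : List (String × List Nat)) (s : PySem.Set Nat) (j : Nat) :
    (j ∈ l.foldl (fun acc p => if p.1 == "O" then PySem.Set.update acc p.2 else acc) s)
    ↔ j ∈ s ∨ ∃ p ∈ l, p.1 = "O" ∧ j ∈ p.2 := by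
  induction l generalizing s with
  | nil => simp
  | cons x l ih =>
    simp only [List.foldl_cons, ih, List.mem_cons]
    split_ifs with hx
    · simp only [PySem.Set.mem_update, beq_iff_eq] at hx ⊢
      constructor
      · rintro ((h | h) | ⟨p, hp, h1, h2⟩)
        · exact Or.inl h
        · exact Or.inr ⟨x, Or.inl rfl, hx, h⟩
        · exact Or.inr ⟨p, Or.inr hp, h1, h2⟩
      · rintro (h | ⟨p, hp | hp, h1, h2⟩)
        · exact Or.inl (Or.inl h)
        · subst hp; exact Or.inl (Or.inr h2)
        · exact Or.inr ⟨p, hp, h1, h2⟩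
    · simp only [beq_iff_eq] at hx
      constructor
      · rintro (h | ⟨p, hp, h1, h2⟩)
        · exact Or.inl h
        · exact Or.inr ⟨p, Or.inr hp, h1, h2⟩
      · rintro (h | ⟨p, hp | hp, h1, h2⟩)
        · exact Or.inl h
        · subst hp; exact absurd h1 hx
        · exact Or.inr ⟨p, hp, h1, h2⟩

-- the adjacency table is symmetric and stays inside the 24 positions
theorem susedni_sym : ∀ i < 24, ∀ j ∈ susedniL.getD i [], j < 24 ∧ i ∈ susedniL.getD j [] := by
  decide

theorem susedniL_length : susedniL.length = 24 := by decide

theorem free_contains_eq (tabla : List String) (i : Nat) :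
    PySem.Set.contains
      ((tabla.zip susedniL).foldl
        (fun acc p => if p.1 == "O" then PySem.Set.update acc p.2 else acc)
        PySem.Set.empty) i
    = !(da_li_je_zarobljen tabla i) := by
  have hL : susedniL.length = 24 := susedniL_length
  rcases hcb : da_li_je_zarobljen tabla i with _ | _
  · -- not blocked: some in-range neighbour s of i holds "O", so i is in the free set
    simp only [da_li_je_zarobljen, List.all_eq_false] at hcb
    obtain ⟨s, hs, hso⟩ := hcb
    have hso' : tabla.getD s "" = "O" := by simpa using hso
    have hslen : s < tabla.length := by
      by_contra hle
      rw [List.getD_eq_default _ _ (Nat.le_of_not_lt hle)] at hso'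
      exact absurd hso' (by decide)
    have hi24 : i < 24 := by
      by_contra hle
      rw [List.getD_eq_default _ _ (by omega : susedniL.length ≤ i)] at hs
      exact absurd hs (List.not_mem_nil)
    have hsym := susedni_sym i hi24 s hs
    simp only [Bool.not_false]
    rw [PySem.Set.contains_iff, mem_freeFold]
    refine Or.inr ⟨(tabla[s], susedniL[s]'(by omega)), ?_, ?_, ?_⟩
    · rw [List.mem_iff_getElem]
      exact ⟨s, by simp [List.length_zip, susedniL_length]; omega, by simp [List.getElem_zip]⟩
    · have h := hso'
      rwa [List.getD_eq_getElem _ _ hslen] at h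
    · have : susedniL.getD s [] = susedniL[s]'(by omega) :=
        List.getD_eq_getElem _ _ (by omega)
      rw [← this]; exact hsym.2
  · -- blocked: no neighbour of i holds "O", so i is not in the free set
    simp only [da_li_je_zarobljen, List.all_eq_true, Bool.not_eq_eq_eq_not, Bool.not_true,
      beq_eq_false_iff_ne, ne_eq] at hcb
    simp only [Bool.not_true]
    rw [← Bool.not_eq_true, PySem.Set.contains_iff, mem_freeFold]
    rintro (habs | ⟨p, hp, hpO, hip⟩)
    · simp [PySem.Set.empty] at habs
    · rw [List.mem_iff_getElem] at hp
      obtain ⟨k, hk, hpk⟩ := hp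
      simp only [List.length_zip, susedniL_length, lt_min_iff] at hk
      rw [List.getElem_zip] at hpk
      have hcell : tabla[k]'(hk.1) = "O" := by rw [← hpk] at hpO; exact hpO
      have hmem : i ∈ susedniL.getD k [] := by
        rw [List.getD_eq_getElem _ _ (by omega : k < susedniL.length)]
        rw [← hpk] at hip; exact hip
      have hsym := susedni_sym k hk.2 i hmem
      have h2 := hcb k hsym.2
      rw [List.getD_eq_getElem _ _ hk.1, hcell] at h2
      exact h2 rfl

-- ===== VERDICT (by name: the statement is the Claim_ definition above) =====
theorem razlika_broja_blokiranih_figura_spec : Claim_equal_razlika_broja_blokiranih_figura := by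
  intro tabla _ _
  unfold Spec_razlika_broja_blokiranih_figura
  unfold razlika_broja_blokiranih_figura razlika_broja_blokiranih_figura_alt
  simp only []
  rw [foldB_eq_sum, foldA_eq_sum]
  simp only [sub_self, zero_add]
  congr 1
  apply List.map_congr_left
  intro i _
  simp only [cA, cB, free_contains_eq tabla i, List.getD]
  rcases hz : da_li_je_zarobljen tabla i with _ | _
  · simp
  · simp only [Bool.not_true, Bool.and_true]
    by_cases hw : tabla[i]?.getD "" = "W"
    · simp [hw]
    · by_cases hb : tabla[i]?.getD "" = "B" <;> simp [hw, hb]
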